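-- pv_equiv track=rewrite | github.com/raeez/chiral-bar-cobar | compute/tests/test_categorical_cg_typeA.py | fundamental_weights_slN
-- ===== SOURCE A (Python) =====
-- def fundamental_weights_slN(N, i):
--     """
--     Weights of V_{omega_i} for sl_N.
--     Returns list of weight vectors (as tuples of length N-1).
--     For omega_1: standard rep, weights are e_1, e_2, ..., e_N
--     projected to the Cartan subalgebra.
--     """
--     if i == 1:
--         # Standard representation: N weights
--         weights = []
--         for j in range(N):
--             w = [0] * (N - 1)
--             if j == 0:
--                 w[0] = 1
--             elif j < N - 1:
--                 w[j - 1] = -1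
--                 w[j] = 1
--             else:
--                 w[N - 2] = -1
--             weights.append(tuple(w))
--         return weights
--     elif i == N - 1:
--         # Dual of standard: N weights
--         return [tuple(-x for x in w)
--                 for w in fundamental_weights_slN(N, 1)]
--     else:
--         # General: use exterior power
--         from itertools import combinations
--         std_wts = fundamental_weights_slN(N, 1)
--         result = []
--         for subset in combinations(range(N), i):
--             w = [0] * (N - 1)
--             for j in subset:
--                 for k in range(N - 1):
--                     w[k] += std_wts[j][k]
--             result.append(tuple(w))
--         return result
-- ===== SOURCE B (Python) =====
-- def fundamental_weights_slN(N, i):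
--     """
--     Weights of V_{omega_i} for sl_N, each weight computed directly from its
--     index subset S via the closed form: coordinate k = [k in S] - [k+1 in S].
--     """
--     def wt(S):
--         s = set(S)
--         return tuple((1 if k in s else 0) - (1 if k + 1 in s else 0)
--                      for k in range(N - 1))
--     if i == 1:
--         return [wt((j,)) for j in range(N)]
--     if i == N - 1:
--         return [tuple(-x for x in wt((j,))) for j in range(N)]
--     from itertools import combinations
--     return [wt(S) for S in combinations(range(N), i)]
-- ===== Notes on version B (the rewrite author's own statement) =====
-- stated objective: alternative
-- what changed: Each weight vector is computed directly from its index subset S by the closed form coordinate k = [k in S] - [k+1 in S] (set membership), instead of recursing to build the table of standard weights and summing its rows per subset; the i==N-1 case negates the singleton closed form instead of mapping negation over a recursive call. Per-weight work drops from O(i*N) to O(N+i), though both still enumerate all C(N,i) subsets.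
import Mathlib
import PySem

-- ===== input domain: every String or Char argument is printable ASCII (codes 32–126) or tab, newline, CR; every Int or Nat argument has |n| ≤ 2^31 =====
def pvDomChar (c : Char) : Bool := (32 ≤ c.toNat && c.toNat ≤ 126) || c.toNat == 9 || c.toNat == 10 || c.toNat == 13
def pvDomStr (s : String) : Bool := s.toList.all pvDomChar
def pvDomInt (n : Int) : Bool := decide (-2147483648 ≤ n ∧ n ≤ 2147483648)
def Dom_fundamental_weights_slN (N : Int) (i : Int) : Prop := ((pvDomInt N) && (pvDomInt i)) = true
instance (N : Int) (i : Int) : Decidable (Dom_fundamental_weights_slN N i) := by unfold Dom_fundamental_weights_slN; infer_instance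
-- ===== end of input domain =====

-- B computes each weight directly from its index subset S by the closed form
-- coordinate k = [k in S] - [k+1 in S], dropping A's recursion and per-subset row summation.


-- shared helper: itertools.combinations(l, n) in lexicographic order (used by both Pythons)
def pyCombinations : List Int → Nat → List (List Int)
  | _, 0 => [[]]
  | [], _ + 1 => []
  | x :: xs, n + 1 =>
      -- itertools' short-circuit: combinations(pool, r) is empty when r > len(pool)
      if xs.length < n then []
      else (pyCombinations xs n).map (fun s => x :: s) ++ pyCombinations xs (n + 1)
  termination_by l _ => l.length

-- ===== PORT A =====
-- the i == 1 branch of A (A's recursion always bottoms out here with the same N)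
def pvStdA (N : Int) : List (List Int) :=
  (PySem.List.pyRange 0 N 1).foldl
    (fun weights j =>
      let w := List.replicate (N - 1).toNat (0 : Int)
      let w :=
        if j = 0 then w.set 0 1
        else if j < N - 1 then (w.set (j - 1).toNat (-1)).set j.toNat 1
        else w.set (N - 2).toNat (-1)
      weights ++ [w])
    []

def fundamental_weights_slN (N : Int) (i : Int) : List (List Int) :=
  if i = 1 then pvStdA N
  else if i = N - 1 then (pvStdA N).map (fun w => w.map (fun x => -x))
  else
    let std_wts := pvStdA N
    (pyCombinations (PySem.List.pyRange 0 N 1) i.toNat).foldl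
      (fun result subset =>
        let w := List.replicate (N - 1).toNat (0 : Int)
        let w := subset.foldl
          (fun w j =>
            (PySem.List.pyRange 0 (N - 1) 1).foldl
              (fun w k => w.set k.toNat (w.getD k.toNat 0 + (std_wts.getD j.toNat []).getD k.toNat 0))
              w)
          w
        result ++ [w])
      []

-- ===== PORT B =====
-- the closed form: coordinate k of the weight of subset S is [k ∈ S] - [k+1 ∈ S]
def pvWtB (N : Int) (S : List Int) : List Int :=
  (PySem.List.pyRange 0 (N - 1) 1).map
    (fun k => (if S.contains k then (1 : Int) else 0) - (if S.contains (k + 1) then 1 else 0))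

def fundamental_weights_slN_alt (N : Int) (i : Int) : List (List Int) :=
  if i = 1 then (PySem.List.pyRange 0 N 1).map (fun j => pvWtB N [j])
  else if i = N - 1 then (PySem.List.pyRange 0 N 1).map (fun j => (pvWtB N [j]).map (fun x => -x))
  else (pyCombinations (PySem.List.pyRange 0 N 1) i.toNat).map (fun S => pvWtB N S)

-- ===== PRECONDITION & SPEC =====
-- Pre_ excludes exactly the inputs on which A raises: every N == 1 (the standard-rep
-- branch writes w[0] into an empty length-0 list, IndexError — reached from every i) and
-- negative i outside the dual branch (combinations raises ValueError).
def Pre_fundamental_weights_slN (N : Int) (i : Int) : Prop := N ≠ 1 ∧ (0 ≤ i ∨ i = N - 1)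
instance (N : Int) (i : Int) : Decidable (Pre_fundamental_weights_slN N i) := by unfold Pre_fundamental_weights_slN; infer_instance
def pvWitness_fundamental_weights_slN : Int × Int := (4, 2)

def Spec_fundamental_weights_slN (N : Int) (i : Int) (out : List (List Int)) : Prop := out = fundamental_weights_slN_alt N i
instance (N : Int) (i : Int) (out : List (List Int)) : Decidable (Spec_fundamental_weights_slN N i out) := by unfold Spec_fundamental_weights_slN; infer_instance

-- ===== CLAIM (what is proved, stated in full; the proofs are below) =====
def Claim_equal_fundamental_weights_slN : Prop := ∀ (N : Int) (i : Int), Dom_fundamental_weights_slN N i → Pre_fundamental_weights_slN N i → Spec_fundamental_weights_slN N i (fundamental_weights_slN N i)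

-- ===== LEMMAS AND PROOFS =====

-- B's weight expressed as a map over List.range with plain membership
theorem pvWtB_eq (N : Int) (S : List Int) :
    pvWtB N S = (List.range (N - 1).toNat).map
      (fun (k : Nat) => (if (k : Int) ∈ S then (1 : Int) else 0) - (if (k : Int) + 1 ∈ S then 1 else 0)) := by
  unfold pvWtB
  rw [PySem.List.pyRange_one, List.map_map]
  rw [show N - 1 - 0 = N - 1 by ring]
  refine List.map_congr_left ?_
  intro k _
  simp

-- A's standard-representation branch equals B's singleton closed forms
theorem pvStdA_eq (N : Int) :
    pvStdA N = (PySem.List.pyRange 0 N 1).map (fun j => pvWtB N [j]) := by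
  rw [show (fun j => pvWtB N [j]) = (fun (j : Int) =>
      (List.range (N - 1).toNat).map
        (fun (k : Nat) => (if (k : Int) ∈ [j] then (1 : Int) else 0) - (if (k : Int) + 1 ∈ [j] then 1 else 0)))
    from funext (fun j => pvWtB_eq N [j])]
  unfold pvStdA
  rw [PySem.List.foldl_append_singleton_eq_map]
  refine List.map_congr_left ?_
  intro j hj
  rw [PySem.List.mem_pyRange_one] at hj
  apply List.ext_getElem
  · split_ifs <;> simp
  · intro k hk hk'
    simp only [List.length_map, List.length_range] at hk'
    split_ifs with h1 h2 <;>
      simp only [List.getElem_set, List.getElem_replicate, List.getElem_map, List.getElem_range,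
        List.mem_singleton] <;> split_ifs <;> omega

theorem pyCombinations_sublist : ∀ (l : List Int) (n : Nat) (s : List Int),
    s ∈ pyCombinations l n → s.Sublist l := by
  intro l
  induction l with
  | nil => intro n s hs
           cases n with
           | zero => simp [pyCombinations] at hs; simp [hs]
           | succ n => simp [pyCombinations] at hs
  | cons x xs ih =>
      intro n s hs
      cases n with
      | zero => simp [pyCombinations] at hs; simp [hs]
      | succ n =>
          rw [pyCombinations] at hs
          by_cases hlen : xs.length < n
          · rw [if_pos hlen] at hs; simp at hs
          · rw [if_neg hlen] at hs
            simp only [List.mem_append, List.mem_map] at hs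
            rcases hs with ⟨t, ht, rfl⟩ | hs
            · exact List.Sublist.cons₂ x (ih n t ht)
            · exact List.Sublist.cons x (ih (n+1) s hs)

-- in-place index loop 'for k in range': sets over fresh indices are a map
theorem pvFoldSet (g : Nat → Int) : ∀ (n a : Nat) (w : List Int), a + n = w.length →
    (List.range' a n).foldl (fun w k => w.set k (w.getD k 0 + g k)) w
      = w.take a ++ (List.range' a n).map (fun k => w.getD k 0 + g k) := by
  intro n
  induction n with
  | zero =>
      intro a w h
      simp only [List.range', List.foldl_nil, List.map_nil, List.append_nil]
      exact (List.take_of_length_le (by omega)).symm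
  | succ n ih =>
      intro a w h
      rw [List.range'_succ, List.foldl_cons, List.map_cons]
      have ha : a < w.length := by omega
      rw [ih (a+1) _ (by simp; omega)]
      have h1 : (w.set a (w.getD a 0 + g a)).take (a+1)
          = w.take a ++ [w.getD a 0 + g a] := by
        rw [List.take_add_one, List.take_set_of_le (le_refl a)]
        simp [ha]
      have h2 : (List.range' (a+1) n).map (fun k => (w.set a (w.getD a 0 + g a)).getD k 0 + g k)
          = (List.range' (a+1) n).map (fun k => w.getD k 0 + g k) := by
        refine List.map_congr_left ?_
        intro k hk
        rw [List.mem_range'] at hk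
        rw [List.getD_eq_getElem?_getD, List.getElem?_set_ne (by omega), ← List.getD_eq_getElem?_getD]
      rw [h1, h2, List.append_assoc]
      rfl

theorem pvMapGetD : ∀ (w : List Int) (m : Nat), w.length = m →
    (List.range m).map (fun k => w.getD k 0) = w := by
  intro w m h
  apply List.ext_getElem
  · simp [h]
  · intro k hk hk'
    simp [List.getD_eq_getElem?_getD, List.getElem?_eq_getElem hk']

-- accumulating the rows of all j ∈ S: the result is entrywise the sum over S
theorem pvFoldSubsets (m : Nat) (g : Int → Nat → Int) : ∀ (S : List Int) (w : List Int), w.length = m →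
    S.foldl (fun w j => (List.range m).foldl (fun w k => w.set k (w.getD k 0 + g j k)) w) w
      = (List.range m).map (fun k => w.getD k 0 + (S.map (fun j => g j k)).sum) := by
  intro S
  induction S with
  | nil =>
      intro w h
      simp only [List.foldl_nil, List.map_nil, List.sum_nil, add_zero]
      exact (pvMapGetD w m h).symm
  | cons j S ih =>
      intro w h
      rw [List.foldl_cons]
      have hrow : (List.range m).foldl (fun w k => w.set k (w.getD k 0 + g j k)) w
          = (List.range m).map (fun k => w.getD k 0 + g j k) := by
        have := pvFoldSet (g j) m 0 w (by omega)
        simpa [List.range_eq_range'] using this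
      rw [hrow, ih _ (by simp)]
      refine List.map_congr_left ?_
      intro k hk
      rw [List.mem_range] at hk
      have hgd : ((List.range m).map (fun k => w.getD k 0 + g j k)).getD k 0 = w.getD k 0 + g j k := by
        rw [List.getD_eq_getElem?_getD, List.getElem?_map]
        simp [List.getElem?_range hk, List.getD_eq_getElem?_getD]
      rw [hgd, List.map_cons, List.sum_cons]
      ring

-- sum of the standard-weight indicator rows over a duplicate-free S is the closed form
theorem pvSumInd (a : Int) : ∀ (S : List Int), S.Nodup →
    (S.map (fun j => (if a = j then (1:Int) else 0) - (if a + 1 = j then 1 else 0))).sum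
      = (if a ∈ S then 1 else 0) - (if a + 1 ∈ S then 1 else 0) := by
  intro S
  induction S with
  | nil => simp
  | cons j S ih =>
      intro h
      rw [List.nodup_cons] at h
      rw [List.map_cons, List.sum_cons, ih h.2]
      simp only [List.mem_cons]
      by_cases h1 : a = j <;> by_cases h2 : a + 1 = j <;>
        by_cases h3 : a ∈ S <;> by_cases h4 : a + 1 ∈ S <;> simp_all

-- the general-branch body of A computes B's closed form on every subset drawn from range(N)
theorem pvGeneralBody (N : Int) (S : List Int) (hS : S.Sublist (PySem.List.pyRange 0 N 1)) :
    S.foldl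
      (fun w j =>
        (PySem.List.pyRange 0 (N - 1) 1).foldl
          (fun w k => w.set k.toNat (w.getD k.toNat 0 + ((pvStdA N).getD j.toNat []).getD k.toNat 0))
          w)
      (List.replicate (N - 1).toNat (0 : Int))
    = pvWtB N S := by
  have hconv : ∀ (w : List Int) (j : Int),
      (PySem.List.pyRange 0 (N - 1) 1).foldl
        (fun w k => w.set k.toNat (w.getD k.toNat 0 + ((pvStdA N).getD j.toNat []).getD k.toNat 0)) w
      = (List.range (N - 1).toNat).foldl
        (fun w k => w.set k (w.getD k 0 + ((pvStdA N).getD j.toNat []).getD k 0)) w := by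
    intro w j
    rw [PySem.List.pyRange_one, List.foldl_map]
    rw [show N - 1 - 0 = N - 1 by ring]
    simp
  simp only [hconv]
  rw [pvFoldSubsets (N - 1).toNat (fun j k => ((pvStdA N).getD j.toNat []).getD k 0) S _ (by simp)]
  rw [pvWtB_eq]
  refine List.map_congr_left ?_
  intro k hk
  rw [List.mem_range] at hk
  have hsum : (S.map (fun j => ((pvStdA N).getD j.toNat []).getD k 0)).sum
      = (S.map (fun j => (if (k : Int) = j then (1:Int) else 0) - (if (k : Int) + 1 = j then 1 else 0))).sum := by
    congr 1
    refine List.map_congr_left ?_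
    intro j hj
    have hjR : j ∈ PySem.List.pyRange 0 N 1 := hS.mem hj
    rw [PySem.List.mem_pyRange_one] at hjR
    have hstd : (pvStdA N).getD j.toNat [] = pvWtB N [j] := by
      rw [pvStdA_eq, List.getD_eq_getElem?_getD, List.getElem?_map]
      have hlen : j.toNat < (PySem.List.pyRange 0 N 1).length := by
        rw [PySem.List.length_pyRange_one]; omega
      rw [List.getElem?_eq_getElem hlen]
      simp [PySem.List.getElem_pyRange_one, Int.toNat_of_nonneg hjR.1]
    rw [hstd, pvWtB_eq, List.getD_eq_getElem?_getD, List.getElem?_map,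
      List.getElem?_eq_getElem (by simpa using hk)]
    simp
  rw [hsum]
  have hnodup : S.Nodup := hS.nodup (PySem.List.nodup_pyRange_one 0 N)
  rw [pvSumInd (k : Int) S hnodup]
  simp

-- ===== VERDICT (by name: the statement is the Claim_ definition above) =====
theorem fundamental_weights_slN_spec : Claim_equal_fundamental_weights_slN := by
  intro N i _ hpre
  unfold Spec_fundamental_weights_slN fundamental_weights_slN fundamental_weights_slN_alt
  by_cases h1 : i = 1
  · simp only [h1, if_true]
    exact pvStdA_eq N
  · by_cases h2 : i = N - 1
    · simp only [h2, if_true]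
      rw [pvStdA_eq, List.map_map]
      rfl
    · simp only [if_neg h1, if_neg h2]
      rw [PySem.List.foldl_append_singleton_eq_map]
      refine List.map_congr_left ?_
      intro S hSmem
      exact pvGeneralBody N S (pyCombinations_sublist _ _ _ hSmem)
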